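-- pv_equiv track=rewrite | github.com/kanakamohank/Beyond-Components | experiments/winogender_sweep.py | prefix_before_pronoun
-- ===== SOURCE A (Python) =====
-- def prefix_before_pronoun(sentence, pronoun):
--     candidates = [f" {pronoun} ", f" {pronoun}.", f" {pronoun},",
--                   f" {pronoun}'"]
--     best = -1
--     for c in candidates:
--         idx = sentence.find(c)
--         if idx >= 0 and (best < 0 or idx < best):
--             best = idx
--     if best < 0:
--         return None
--     return sentence[: best].rstrip()
-- ===== SOURCE B (Python) =====
-- def prefix_before_pronoun(sentence, pronoun):
--     # Single forward scan: walk the occurrences of " "+pronoun left to right and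
--     # return at the first one followed by one of the four trailing characters.
--     target = " " + pronoun
--     m = len(target)
--     pos = 0
--     while True:
--         idx = sentence.find(target, pos)
--         if idx < 0:
--             return None
--         if sentence[idx+m:idx+m+1] in (" ", ".", ",", "'"):
--             return sentence[:idx].rstrip()
--         pos = idx + 1
-- ===== Notes on version B (the rewrite author's own statement) =====
-- stated objective: alternative
-- what changed: A runs four separate str.find scans (one per candidate ' pronoun'+trailer) and folds their minimum index; B walks the occurrences of the single string ' '+pronoun left to right with find(target, pos) and returns at the first occurrence followed by one of the four trailing characters.
import Mathlib
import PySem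

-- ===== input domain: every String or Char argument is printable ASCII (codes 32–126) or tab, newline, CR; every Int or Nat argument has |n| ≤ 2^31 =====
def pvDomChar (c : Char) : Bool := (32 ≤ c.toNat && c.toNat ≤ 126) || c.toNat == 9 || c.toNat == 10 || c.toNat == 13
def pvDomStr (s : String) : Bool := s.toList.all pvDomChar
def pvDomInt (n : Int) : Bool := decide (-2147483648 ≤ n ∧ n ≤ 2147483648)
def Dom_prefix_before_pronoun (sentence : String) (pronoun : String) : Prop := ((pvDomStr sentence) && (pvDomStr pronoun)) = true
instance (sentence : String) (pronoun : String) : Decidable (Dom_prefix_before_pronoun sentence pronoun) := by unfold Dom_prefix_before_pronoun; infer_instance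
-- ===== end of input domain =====

-- B replaces A's four str.find passes by one left-to-right scan for the earliest
-- position where " "+pronoun occurs followed by one of the four trailing characters
-- (objective: alternative single-pass algorithm; return values proved equal).

-- ===== PORT A =====
def prefix_before_pronoun (sentence : String) (pronoun : String) : Option String :=
  let candidates : List String :=
    [" " ++ pronoun ++ " ", " " ++ pronoun ++ ".", " " ++ pronoun ++ ",", " " ++ pronoun ++ "'"]
  let best : Int := candidates.foldl (fun best c =>
    let idx := PySem.Str.find sentence c
    if 0 ≤ idx ∧ (best < 0 ∨ idx < best) then idx else best) (-1)
  if best < 0 then none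
  else some (PySem.Str.rstrip (PySem.Str.slice sentence none (some best)))

-- ===== PORT B =====
-- while True: idx = sentence.find(target, pos); … — pos strictly increases each
-- iteration and never exceeds len(sentence), so fuel len(sentence)+1 only makes
-- the loop total; every step is the Python loop body.
def pvScan (s target : String) (m : Int) : Nat → Int → Option String
  | 0, _ => none
  | fuel + 1, pos =>
    let idx := PySem.Str.findFrom s target pos
    if idx < 0 then none
    else if PySem.Str.slice s (some (idx + m)) (some (idx + m + 1)) ∈ ([" ", ".", ",", "'"] : List String)
    then some (PySem.Str.rstrip (PySem.Str.slice s none (some idx)))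
    else pvScan s target m fuel (idx + 1)

def prefix_before_pronoun_alt (sentence : String) (pronoun : String) : Option String :=
  let target : String := " " ++ pronoun
  let m : Int := PySem.Str.len target
  pvScan sentence target m ((PySem.Str.len sentence).toNat + 1) 0

-- ===== PRECONDITION & SPEC =====
def Spec_prefix_before_pronoun (sentence : String) (pronoun : String) (out : Option String) : Prop := out = prefix_before_pronoun_alt sentence pronoun
instance (sentence : String) (pronoun : String) (out : Option String) : Decidable (Spec_prefix_before_pronoun sentence pronoun out) := by unfold Spec_prefix_before_pronoun; infer_instance

-- ===== CLAIM (what is proved, stated in full; the proofs are below) =====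
def Claim_equal_prefix_before_pronoun : Prop := ∀ (sentence : String) (pronoun : String), Dom_prefix_before_pronoun sentence pronoun → Spec_prefix_before_pronoun sentence pronoun (prefix_before_pronoun sentence pronoun)

-- ===== LEMMAS AND PROOFS =====

-- "a match at position i": some tail character t such that ' '::P ++ [t] starts at L.drop i
def pvQ (L P : List Char) (i : Nat) : Bool :=
  ([' ', '.', ',', '\''].any (fun t => ((' ' :: P) ++ [t]).isPrefixOf (L.drop i)))

theorem pvQ_iff (L P : List Char) (i : Nat) :
    pvQ L P i = true ↔ ∃ t ∈ [' ', '.', ',', '\''], ((' ' :: P) ++ [t]) <+: L.drop i := by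
  simp [pvQ, List.isPrefixOf_iff_prefix]

theorem prefix_append_iff {α : Type} (a b l : List α) :
    (a ++ b) <+: l ↔ a <+: l ∧ b <+: l.drop a.length := by
  constructor
  · rintro ⟨r, hr⟩
    subst hr
    exact ⟨⟨b ++ r, by simp⟩, ⟨r, by rw [List.append_assoc, List.drop_left]⟩⟩
  · rintro ⟨⟨r1, h1⟩, ⟨r2, h2⟩⟩
    have hd : l.drop a.length = r1 := by rw [← h1, List.drop_left]
    rw [hd] at h2
    exact ⟨r2, by rw [← h1, ← h2, List.append_assoc]⟩

-- the four one-character tail strings, as characters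
theorem mem_tailsS (u : String) :
    u ∈ ([" ", ".", ",", "'"] : List String) ↔
      ∃ t ∈ ([' ', '.', ',', '\''] : List Char), u.toList = [t] := by
  constructor
  · intro h
    simp only [List.mem_cons, List.not_mem_nil, or_false] at h
    rcases h with h | h | h | h <;> subst h
    · exact ⟨' ', by decide, by decide⟩
    · exact ⟨'.', by decide, by decide⟩
    · exact ⟨',', by decide, by decide⟩
    · exact ⟨'\'', by decide, by decide⟩
  · rintro ⟨t, ht, htl⟩
    fin_cases ht
    · have : u = " " := String.toList_inj.mp (by rw [htl]; decide)
      simp [this]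
    · have : u = "." := String.toList_inj.mp (by rw [htl]; decide)
      simp [this]
    · have : u = "," := String.toList_inj.mp (by rw [htl]; decide)
      simp [this]
    · have : u = "'" := String.toList_inj.mp (by rw [htl]; decide)
      simp [this]

-- the condition tested by B at index ↑i is exactly pvQ
theorem cond_iff_pvQ (s p : String) (i : Nat) :
    (PySem.Str.slice s (some (i : Int)) (some ((i : Int) + PySem.Str.len (" " ++ p))) = (" " ++ p) ∧
     PySem.Str.slice s (some ((i : Int) + PySem.Str.len (" " ++ p)))
        (some ((i : Int) + PySem.Str.len (" " ++ p) + 1)) ∈ ([" ", ".", ",", "'"] : List String))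
    ↔ pvQ s.toList p.toList i = true := by
  have htl : (" " ++ p).toList = ' ' :: p.toList := by rw [String.toList_append]; rfl
  have hm : PySem.Str.len (" " ++ p) = ((p.toList.length + 1 : Nat) : Int) := by
    rw [PySem.Str.len_eq, htl]; push_cast [List.length_cons]; ring
  rw [hm]
  set L := s.toList with hL
  set P := p.toList with hP
  set mN : Nat := P.length + 1 with hmN
  have hlenbase : (' ' :: P).length = mN := by simp [hmN]
  have hc1 : ((i : Int) + (mN : Int)) = ((i + mN : Nat) : Int) := by push_cast; ring
  have hc2 : ((i : Int) + (mN : Int) + 1) = ((i + mN + 1 : Nat) : Int) := by push_cast; ring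
  have hslice1 : (PySem.Str.slice s (some (i : Int)) (some ((i : Int) + (mN : Int)))).toList
      = (L.drop i).take mN := by
    rw [hc1, PySem.Str.toList_slice, PySem.Chars.slice_eq_listSlice,
        PySem.List.slice_toNat _ (Int.natCast_nonneg _) (Int.natCast_nonneg _)]
    simp only [Int.toNat_natCast, ← hL]
    congr 1
    omega
  have hslice2 : (PySem.Str.slice s (some ((i : Int) + (mN : Int)))
      (some ((i : Int) + (mN : Int) + 1))).toList = ((L.drop i).drop mN).take 1 := by
    rw [hc2, hc1, PySem.Str.toList_slice, PySem.Chars.slice_eq_listSlice,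
        PySem.List.slice_toNat _ (Int.natCast_nonneg _) (Int.natCast_nonneg _)]
    simp only [Int.toNat_natCast, ← hL]
    rw [List.drop_drop]
    congr 1
    omega
  rw [pvQ_iff]
  constructor
  · rintro ⟨h1, h2⟩
    have hpre1 : (' ' :: P) <+: L.drop i := by
      rw [List.prefix_iff_eq_take, hlenbase]
      have h1l := congrArg String.toList h1
      rw [hslice1, htl] at h1l
      exact h1l.symm
    obtain ⟨t, ht, hteq⟩ := (mem_tailsS _).mp h2
    rw [hslice2] at hteq
    refine ⟨t, ht, ?_⟩
    rw [prefix_append_iff, hlenbase]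
    refine ⟨hpre1, ?_⟩
    rw [List.prefix_iff_eq_take]
    simpa using hteq.symm
  · rintro ⟨t, ht, hpre⟩
    rw [prefix_append_iff, hlenbase] at hpre
    obtain ⟨hpre1, hpre2⟩ := hpre
    constructor
    · rw [← String.toList_inj, hslice1, htl]
      rw [List.prefix_iff_eq_take, hlenbase] at hpre1
      exact hpre1.symm
    · rw [mem_tailsS]
      refine ⟨t, ht, ?_⟩
      rw [hslice2]
      rw [List.prefix_iff_eq_take] at hpre2
      simpa using hpre2.symm

-- a match implies the search target " "+pronoun occurs there
theorem target_toList (p : String) : (" " ++ p).toList = ' ' :: p.toList := by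
  rw [String.toList_append]; rfl

theorem pvQ_prefix {L P : List Char} {j : Nat} (h : pvQ L P j = true) :
    (' ' :: P) <+: L.drop j := by
  rw [pvQ_iff] at h
  obtain ⟨t, _, hpre⟩ := h
  exact ((prefix_append_iff _ _ _).mp hpre).1

-- the slice-equality test is exactly "target occurs at i"
theorem slice1_iff (s p : String) (i : Nat) :
    PySem.Str.slice s (some (i : Int)) (some ((i : Int) + PySem.Str.len (" " ++ p))) = (" " ++ p)
    ↔ (' ' :: p.toList) <+: s.toList.drop i := by
  have htl := target_toList p
  have hm : PySem.Str.len (" " ++ p) = ((p.toList.length + 1 : Nat) : Int) := by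
    rw [PySem.Str.len_eq, htl]; push_cast [List.length_cons]; ring
  rw [hm]
  have hc1 : ((i : Int) + ((p.toList.length + 1 : Nat) : Int)) = ((i + (p.toList.length + 1) : Nat) : Int) := by
    push_cast; ring
  have hslice1 : (PySem.Str.slice s (some (i : Int)) (some ((i : Int) + ((p.toList.length + 1 : Nat) : Int)))).toList
      = (s.toList.drop i).take (p.toList.length + 1) := by
    rw [hc1, PySem.Str.toList_slice, PySem.Chars.slice_eq_listSlice,
        PySem.List.slice_toNat _ (Int.natCast_nonneg _) (Int.natCast_nonneg _)]
    simp only [Int.toNat_natCast]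
    congr 1
    omega
  constructor
  · intro h
    rw [List.prefix_iff_eq_take, show (' ' :: p.toList).length = p.toList.length + 1 from by simp]
    have hl := congrArg String.toList h
    rw [hslice1, htl] at hl
    exact hl.symm
  · intro h
    rw [← String.toList_inj, hslice1, htl]
    rw [List.prefix_iff_eq_take, show (' ' :: p.toList).length = p.toList.length + 1 from by simp] at h
    exact h.symm

-- the scanning loop of B: behaviour from any start position with no earlier match
theorem scan_eq (s p : String) : ∀ (fuel : Nat) (pos : Nat),
    s.toList.length + 1 ≤ fuel + pos → pos ≤ s.toList.length →
    (∀ j < pos, ¬ pvQ s.toList p.toList j = true) →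
    ((¬ ∃ i, pvQ s.toList p.toList i = true) →
        pvScan s (" " ++ p) (PySem.Str.len (" " ++ p)) fuel (pos : Int) = none) ∧
    (∀ (hQ : ∃ i, pvQ s.toList p.toList i = true),
        pvScan s (" " ++ p) (PySem.Str.len (" " ++ p)) fuel (pos : Int)
          = some (PySem.Str.rstrip (PySem.Str.slice s none (some ((Nat.find hQ : Nat) : Int))))) := by
  intro fuel
  induction fuel with
  | zero =>
    intro pos hfuel hpos _
    exfalso
    omega
  | succ fuel ih =>
    intro pos hfuel hpos hprev
    have htl := target_toList p
    simp only [pvScan, PySem.Str.findFrom_eq]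
    by_cases hidx : PySem.Chars.findFrom s.toList (" " ++ p).toList ((pos : Nat) : Int) none = -1
    · rw [hidx, if_pos (by norm_num)]
      constructor
      · intro _; rfl
      · intro hQ
        exfalso
        have hN := Nat.find_spec hQ
        by_cases hNp : Nat.find hQ < pos
        · exact hprev _ hNp hN
        · have hinf : (" " ++ p).toList <:+: s.toList.drop pos := by
            rw [← PySem.Chars.isIn_iff_infix, ← PySem.Chars.exists_prefix_drop_iff_isIn]
            refine ⟨Nat.find hQ - pos, ?_⟩
            rw [List.drop_drop, show pos + (Nat.find hQ - pos) = Nat.find hQ from by omega, htl]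
            exact pvQ_prefix hN
          exact ((PySem.Chars.findFrom_natCast_eq_neg_one_iff s.toList (" " ++ p).toList pos hpos).mp hidx) hinf
    · have hspec := PySem.Chars.findFrom_natCast_spec s.toList (" " ++ p).toList pos hpos hidx
      set f := PySem.Chars.findFrom s.toList (" " ++ p).toList ((pos : Nat) : Int) none with hfd
      have hge : (0 : Int) ≤ f := le_trans (Int.natCast_nonneg pos) hspec.1
      have hfk : f = ((f.toNat : Nat) : Int) := (Int.toNat_of_nonneg hge).symm
      have hpreK : (' ' :: p.toList) <+: s.toList.drop f.toNat := by
        rw [← htl]; exact hspec.2.1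
      have hklen : f.toNat < s.toList.length := by
        have hl := hspec.2.1.length_le
        rw [htl] at hl
        simp only [List.length_cons, List.length_drop] at hl
        omega
      rw [if_neg (by omega)]
      rw [hfk]
      by_cases htail : PySem.Str.slice s (some ((f.toNat : Int) + PySem.Str.len (" " ++ p)))
          (some ((f.toNat : Int) + PySem.Str.len (" " ++ p) + 1)) ∈ ([" ", ".", ",", "'"] : List String)
      · rw [if_pos htail]
        have hQk : pvQ s.toList p.toList f.toNat = true :=
          (cond_iff_pvQ s p f.toNat).mp ⟨(slice1_iff s p f.toNat).mpr hpreK, htail⟩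
        constructor
        · intro hno
          exact absurd ⟨_, hQk⟩ hno
        · intro hQ
          have hkmin : ∀ j < f.toNat, ¬ pvQ s.toList p.toList j = true := by
            intro j hj hpvQ
            by_cases hjp : j < pos
            · exact hprev j hjp hpvQ
            · refine hspec.2.2 j (by omega) hj ?_
              rw [htl]
              exact pvQ_prefix hpvQ
          have hfind : Nat.find hQ = f.toNat :=
            le_antisymm (Nat.find_min' hQ hQk)
              (by by_contra hlt; exact hkmin _ (by omega) (Nat.find_spec hQ))
          rw [hfind]
      · rw [if_neg htail]
        have hcast : ((f.toNat : Int) + 1) = ((f.toNat + 1 : Nat) : Int) := by push_cast; ring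
        rw [hcast]
        apply ih (f.toNat + 1) (by omega) (by omega)
        intro j hj hpvQ
        by_cases hjp : j < pos
        · exact hprev j hjp hpvQ
        · by_cases hjk : j < f.toNat
          · refine hspec.2.2 j (by omega) hjk ?_
            rw [htl]
            exact pvQ_prefix hpvQ
          · have hjeq : j = f.toNat := by omega
            rw [hjeq] at hpvQ
            exact htail ((cond_iff_pvQ s p f.toNat).mpr hpvQ).2

-- B returns none when no index matches
theorem B_none (s p : String) (hQ : ¬ ∃ i, pvQ s.toList p.toList i = true) :
    prefix_before_pronoun_alt s p = none := by
  simp only [prefix_before_pronoun_alt]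
  have h := (scan_eq s p ((PySem.Str.len s).toNat + 1) 0
      (by simp [PySem.Str.len_eq]) (by omega) (by omega)).1 hQ
  simpa using h

-- B returns the prefix at the least matching index
theorem B_some (s p : String) (hQ : ∃ i, pvQ s.toList p.toList i = true) :
    prefix_before_pronoun_alt s p =
      some (PySem.Str.rstrip (PySem.Str.slice s none (some ((Nat.find hQ : Nat) : Int)))) := by
  simp only [prefix_before_pronoun_alt]
  have h := (scan_eq s p ((PySem.Str.len s).toNat + 1) 0
      (by simp [PySem.Str.len_eq]) (by omega) (by omega)).2 hQ
  simpa using h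

-- the fold in A computes the minimum candidate index
def pvG (b x : Int) : Int := if 0 ≤ x ∧ (b < 0 ∨ x < b) then x else b

theorem fold_min (N : Nat) (cs : List Int) :
    ∀ (acc : Int),
    (∀ x ∈ cs, x = -1 ∨ (N : Int) ≤ x) → (acc = -1 ∨ (N : Int) ≤ acc) →
    ((N : Int) ∈ cs ∨ acc = (N : Int)) → cs.foldl pvG acc = (N : Int) := by
  induction cs with
  | nil =>
    intro acc _ _ hin
    simpa using hin.resolve_left (by simp)
  | cons c cs ih =>
    intro acc hall hacc hin
    simp only [List.foldl_cons]
    have hc := hall c (List.mem_cons_self ..)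
    have hN : (0 : Int) ≤ (N : Int) := Int.natCast_nonneg N
    by_cases haccN : acc = (N : Int)
    · have hg : pvG acc c = (N : Int) := by
        subst haccN
        unfold pvG
        split_ifs with hcond
        · obtain ⟨h0, hor⟩ := hcond
          rcases hc with h | h
          · omega
          · rcases hor with h' | h' <;> omega
        · rfl
      rw [hg]
      exact ih _ (fun x hx => hall x (List.mem_cons_of_mem _ hx)) (Or.inr le_rfl) (Or.inr rfl)
    · rcases List.mem_cons.mp (hin.resolve_right haccN) with hcN | hcs'
      · have hg : pvG acc c = (N : Int) := by
          rw [← hcN]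
          unfold pvG
          split_ifs with hcond
          · rfl
          · exfalso
            rcases hacc with h | h
            · exact hcond ⟨hN, Or.inl (by omega)⟩
            · exact hcond ⟨hN, Or.inr (by omega)⟩
        rw [hg]
        exact ih _ (fun x hx => hall x (List.mem_cons_of_mem _ hx)) (Or.inr le_rfl) (Or.inr rfl)
      · have hS : pvG acc c = -1 ∨ (N : Int) ≤ pvG acc c := by
          unfold pvG
          split_ifs with hcond
          · obtain ⟨h0, _⟩ := hcond
            rcases hc with h | h
            · omega
            · exact Or.inr h
          · exact hacc
        exact ih _ (fun x hx => hall x (List.mem_cons_of_mem _ hx)) hS (Or.inl hcs')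

-- candidate toLists
theorem cand_toList (p : String) (t : Char) (ts : String) (hts : ts.toList = [t]) :
    (" " ++ p ++ ts).toList = (' ' :: p.toList) ++ [t] := by
  rw [String.toList_append, String.toList_append, hts]
  rfl

-- facts about A's candidate finds relative to the least pvQ index
theorem find_cand_lower (s p : String) (t : Char) (ht : t ∈ ([' ', '.', ',', '\''] : List Char))
    (hQ : ∃ i, pvQ s.toList p.toList i = true) :
    PySem.Chars.find s.toList ((' ' :: p.toList) ++ [t]) = -1 ∨
    ((Nat.find hQ : Nat) : Int) ≤ PySem.Chars.find s.toList ((' ' :: p.toList) ++ [t]) := by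
  set f := PySem.Chars.find s.toList ((' ' :: p.toList) ++ [t]) with hf
  by_cases h : f = -1
  · exact Or.inl h
  · right
    have hge : 0 ≤ f := by
      have := PySem.Chars.neg_one_le_find s.toList ((' ' :: p.toList) ++ [t])
      omega
    have hspec := PySem.Chars.find_spec (s := s.toList) (sub := (' ' :: p.toList) ++ [t]) hge
    have hQf : pvQ s.toList p.toList f.toNat = true := by
      rw [pvQ_iff]; exact ⟨t, ht, hspec.1⟩
    have := Nat.find_min' hQ hQf
    omega

theorem find_cand_hit (s p : String) (hQ : ∃ i, pvQ s.toList p.toList i = true) :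
    ∃ t ∈ ([' ', '.', ',', '\''] : List Char),
      PySem.Chars.find s.toList ((' ' :: p.toList) ++ [t]) = ((Nat.find hQ : Nat) : Int) := by
  have hQN := Nat.find_spec hQ
  rw [pvQ_iff] at hQN
  obtain ⟨t, ht, hpre⟩ := hQN
  refine ⟨t, ht, ?_⟩
  set f := PySem.Chars.find s.toList ((' ' :: p.toList) ++ [t]) with hf
  have hinf : ((' ' :: p.toList) ++ [t]) <:+: s.toList := by
    rw [← PySem.Chars.isIn_iff_infix, ← PySem.Chars.exists_prefix_drop_iff_isIn]
    exact ⟨Nat.find hQ, hpre⟩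
  have hne : f ≠ -1 := by
    rw [hf, Ne, PySem.Chars.find_eq_neg_one_iff]
    exact fun h => h hinf
  have hge : 0 ≤ f := by
    have := PySem.Chars.neg_one_le_find s.toList ((' ' :: p.toList) ++ [t])
    omega
  have hspec := PySem.Chars.find_spec (s := s.toList) (sub := (' ' :: p.toList) ++ [t]) hge
  have hle : f.toNat ≤ Nat.find hQ := by
    by_contra hlt
    exact hspec.2 (Nat.find hQ) (by omega) hpre
  have hge2 : Nat.find hQ ≤ f.toNat := by
    apply Nat.find_min' hQ
    rw [pvQ_iff]
    exact ⟨t, ht, hspec.1⟩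
  omega

-- A's behaviour: the two cases
theorem A_none (s p : String) (hQ : ¬ ∃ i, pvQ s.toList p.toList i = true) :
    prefix_before_pronoun s p = none := by
  have hallm1 : ∀ (t : Char) (ts : String), ts.toList = [t] → t ∈ ([' ', '.', ',', '\''] : List Char) →
      PySem.Str.find s (" " ++ p ++ ts) = -1 := by
    intro t ts hts ht
    rw [PySem.Str.find_eq, cand_toList p t ts hts, PySem.Chars.find_eq_neg_one_iff]
    intro hinf
    rw [← PySem.Chars.isIn_iff_infix, ← PySem.Chars.exists_prefix_drop_iff_isIn] at hinf
    obtain ⟨j, hj⟩ := hinf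
    exact hQ ⟨j, by rw [pvQ_iff]; exact ⟨t, ht, hj⟩⟩
  simp only [prefix_before_pronoun, List.foldl_cons, List.foldl_nil,
    hallm1 ' ' " " (by decide) (by decide), hallm1 '.' "." (by decide) (by decide),
    hallm1 ',' "," (by decide) (by decide), hallm1 '\'' "'" (by decide) (by decide)]
  norm_num

theorem A_some (s p : String) (hQ : ∃ i, pvQ s.toList p.toList i = true) :
    prefix_before_pronoun s p =
      some (PySem.Str.rstrip (PySem.Str.slice s none (some ((Nat.find hQ : Nat) : Int)))) := by
  have hbest : List.foldl (fun (best : Int) (c : String) =>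
      if 0 ≤ PySem.Str.find s c ∧ (best < 0 ∨ PySem.Str.find s c < best) then PySem.Str.find s c else best)
      (-1) [" " ++ p ++ " ", " " ++ p ++ ".", " " ++ p ++ ",", " " ++ p ++ "'"]
      = ((Nat.find hQ : Nat) : Int) := by
    have hmap : List.foldl (fun (best : Int) (c : String) =>
        if 0 ≤ PySem.Str.find s c ∧ (best < 0 ∨ PySem.Str.find s c < best) then PySem.Str.find s c else best)
        (-1) [" " ++ p ++ " ", " " ++ p ++ ".", " " ++ p ++ ",", " " ++ p ++ "'"]
        = List.foldl pvG (-1)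
            (([" " ++ p ++ " ", " " ++ p ++ ".", " " ++ p ++ ",", " " ++ p ++ "'"] : List String).map
              (PySem.Str.find s)) := by
      rw [List.foldl_map]
      rfl
    rw [hmap]
    apply fold_min
    · intro x hx
      simp only [List.map_cons, List.map_nil, List.mem_cons, List.not_mem_nil, or_false] at hx
      have key : ∀ (t : Char) (ts : String), ts.toList = [t] → t ∈ ([' ', '.', ',', '\''] : List Char) →
          x = PySem.Str.find s (" " ++ p ++ ts) →
          x = -1 ∨ ((Nat.find hQ : Nat) : Int) ≤ x := by
        intro t ts hts ht hxe
        rw [hxe, PySem.Str.find_eq, cand_toList p t ts hts]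
        exact find_cand_lower s p t ht hQ
      rcases hx with h | h | h | h
      · exact key ' ' " " (by decide) (by decide) h
      · exact key '.' "." (by decide) (by decide) h
      · exact key ',' "," (by decide) (by decide) h
      · exact key '\'' "'" (by decide) (by decide) h
    · exact Or.inl rfl
    · left
      obtain ⟨t, ht, hfind⟩ := find_cand_hit s p hQ
      simp only [List.map_cons, List.map_nil, List.mem_cons, List.not_mem_nil, or_false]
      fin_cases ht
      · left
        rw [PySem.Str.find_eq, cand_toList p ' ' " " (by decide)]
        exact hfind.symm
      · right; left
        rw [PySem.Str.find_eq, cand_toList p '.' "." (by decide)]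
        exact hfind.symm
      · right; right; left
        rw [PySem.Str.find_eq, cand_toList p ',' "," (by decide)]
        exact hfind.symm
      · right; right; right
        rw [PySem.Str.find_eq, cand_toList p '\'' "'" (by decide)]
        exact hfind.symm
  simp only [prefix_before_pronoun]
  rw [hbest, if_neg (by omega)]

-- ===== VERDICT (by name: the statement is the Claim_ definition above) =====
theorem prefix_before_pronoun_spec : Claim_equal_prefix_before_pronoun := by
  intro s p _
  unfold Spec_prefix_before_pronoun
  by_cases hQ : ∃ i, pvQ s.toList p.toList i = true
  · rw [A_some s p hQ, B_some s p hQ]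
  · rw [A_none s p hQ, B_none s p hQ]
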